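-- pv_equiv track=rewrite | github.com/consultant-1379/network-analytics-pm-sd-alarming | resources/scripts/Python/worker_files_scripts/UpdateAlarmInfoTable.py | create_dict_per_eniq
-- ===== SOURCE A (Python) =====
-- def create_dict_per_eniq(dict_data):
--     #function takes dictionary of dictionary items
--     #returns dictionary of given data grouped per eniq
--     per_Eniq_Ds_info = {}
--     for index, alarm_info in dict_data.items():
--         tmp = {}
--         if alarm_info["eniqName"] in per_Eniq_Ds_info:
--             tmp[len(per_Eniq_Ds_info[alarm_info["eniqName"]].keys())+1] = alarm_info
--             per_Eniq_Ds_info[alarm_info["eniqName"]].update(tmp)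
--
--         else:
--             tmp[1] =alarm_info
--             per_Eniq_Ds_info[alarm_info["eniqName"]] = tmp
--
--     return per_Eniq_Ds_info
-- ===== SOURCE B (Python) =====
-- def create_dict_per_eniq(dict_data):
--     # Different algorithm: first find the distinct eniq names (first-occurrence
--     # order), then for each name make a separate scan over the data, numbering
--     # that name's alarms 1..k. Nested scans instead of one incremental pass.
--     infos = list(dict_data.values())
--     names = dict.fromkeys(info["eniqName"] for info in infos)
--     return {
--         name: dict(enumerate((info for info in infos if info["eniqName"] == name), 1))
--         for name in names
--     }
-- ===== Notes on version B (the rewrite author's own statement) =====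
-- stated objective: alternative
-- what changed: B replaces A's single incremental grouping pass with a name-directed algorithm: it first computes the distinct eniq names in first-occurrence order (dict.fromkeys), then for each name performs its own scan of the data, numbering that name's alarms 1..k with enumerate; A instead threads one nested dict through one pass, sizing each inner dict to pick the next key.
import Mathlib
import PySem

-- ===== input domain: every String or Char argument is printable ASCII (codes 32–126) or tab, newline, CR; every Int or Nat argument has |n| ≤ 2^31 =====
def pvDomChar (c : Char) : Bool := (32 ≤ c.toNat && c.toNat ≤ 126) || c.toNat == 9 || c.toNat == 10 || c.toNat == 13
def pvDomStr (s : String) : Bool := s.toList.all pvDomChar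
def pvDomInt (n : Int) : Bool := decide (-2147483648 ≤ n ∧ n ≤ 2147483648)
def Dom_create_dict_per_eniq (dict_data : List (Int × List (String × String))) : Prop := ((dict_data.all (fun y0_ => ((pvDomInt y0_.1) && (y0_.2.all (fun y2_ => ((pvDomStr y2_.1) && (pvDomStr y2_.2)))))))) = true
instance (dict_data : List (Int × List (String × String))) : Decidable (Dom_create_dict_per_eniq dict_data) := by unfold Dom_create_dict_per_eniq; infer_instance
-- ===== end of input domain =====

-- B computes distinct eniq names first and then scans the data once per name to number its
-- alarms 1..k, instead of A's single incremental nested-dict pass; same return value, proved below.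


-- ===== PORT A =====
-- dict_data is a Python dict of dicts: marshal the association list into nested PySem.Dict first,
-- iterate .items() in dict order, and return the nested result as items lists.
def create_dict_per_eniq (dict_data : List (Int × List (String × String))) : List (String × List (Int × List (String × String))) :=
  let dd : PySem.Dict Int (PySem.Dict String String) :=
    PySem.Dict.ofList (dict_data.map (fun p => (p.1, PySem.Dict.ofList p.2)))
  let per : PySem.Dict String (PySem.Dict Int (PySem.Dict String String)) :=
    dd.items.foldl (fun per p =>
      -- alarm_info["eniqName"]: KeyError when absent — excluded by Pre_; getD "" is the total stand-in
      let name := (p.2.get? "eniqName").getD ""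
      if per.contains name then
        per.insert name ((per.getD name PySem.Dict.empty).insert
          (((per.getD name PySem.Dict.empty).keys.length : Int) + 1) p.2)
      else
        per.insert name ((PySem.Dict.empty : PySem.Dict Int (PySem.Dict String String)).insert 1 p.2))
      PySem.Dict.empty
  per.items.map (fun q => (q.1, q.2.items.map (fun r => (r.1, r.2.items))))

-- ===== PORT B =====
-- enumFrom n l = list of pairs ((n, l[0]), (n+1, l[1]), …): dict(enumerate(it, n)) as items
def enumFrom {α : Type} (n : Int) : List α → List (Int × α)
  | [] => []
  | a :: t => (n, a) :: enumFrom (n + 1) t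

def create_dict_per_eniq_alt (dict_data : List (Int × List (String × String))) : List (String × List (Int × List (String × String))) :=
  let dd : PySem.Dict Int (PySem.Dict String String) :=
    PySem.Dict.ofList (dict_data.map (fun p => (p.1, PySem.Dict.ofList p.2)))
  let infos := dd.values
  -- names = dict.fromkeys(info["eniqName"] for info in infos): distinct, first-occurrence order
  let names := PySem.List.dedup (infos.map (fun a => (a.get? "eniqName").getD ""))
  -- {name: dict(enumerate((info for info in infos if info["eniqName"] == name), 1)) for name in names}
  names.map (fun n =>
    (n, enumFrom 1 ((infos.filter (fun a => ((a.get? "eniqName").getD "") == n)).map (fun a => a.items))))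

-- ===== PRECONDITION & SPEC =====
-- Pre_ excludes exactly the inputs whose denoted dict holds an alarm dict without the key
-- "eniqName": there the Python A raises KeyError (no size bound; nothing else is excluded).
def Pre_create_dict_per_eniq (dict_data : List (Int × List (String × String))) : Prop :=
  ∀ al ∈ (PySem.Dict.ofList (dict_data.map (fun p => (p.1, PySem.Dict.ofList p.2)))).values,
    al.contains "eniqName" = true
instance (dict_data : List (Int × List (String × String))) : Decidable (Pre_create_dict_per_eniq dict_data) := by unfold Pre_create_dict_per_eniq; infer_instance

def pvWitness_create_dict_per_eniq : (List (Int × List (String × String))) :=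
  [(1, [("eniqName", "x")]), (2, [("eniqName", "y"), ("a", "b")]), (3, [("eniqName", "x")])]

def Spec_create_dict_per_eniq (dict_data : List (Int × List (String × String))) (out : List (String × List (Int × List (String × String)))) : Prop := out = create_dict_per_eniq_alt dict_data
instance (dict_data : List (Int × List (String × String))) (out : List (String × List (Int × List (String × String)))) : Decidable (Spec_create_dict_per_eniq dict_data out) := by unfold Spec_create_dict_per_eniq; infer_instance

-- ===== CLAIM (what is proved, stated in full; the proofs are below) =====
def Claim_equal_create_dict_per_eniq : Prop := ∀ (dict_data : List (Int × List (String × String))), Dom_create_dict_per_eniq dict_data → Pre_create_dict_per_eniq dict_data → Spec_create_dict_per_eniq dict_data (create_dict_per_eniq dict_data)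

-- ===== LEMMAS AND PROOFS =====

-- the eniq name A and B both read off an alarm dict
def pvName (a : PySem.Dict String String) : String := (a.get? "eniqName").getD ""

-- B's grouping rendered as A's nested dict: a list (n, l) becomes (n, {1: l[0], …, |l|: l[|l|-1]})
def pvMk (G : PySem.Dict String (List (PySem.Dict String String))) :
    PySem.Dict String (PySem.Dict Int (PySem.Dict String String)) :=
  PySem.Dict.mk (G.items.map (fun q => (q.1, PySem.Dict.mk (enumFrom 1 q.2))))

-- the distinct names of L (first-occurrence order) that are not already in seen
def pvNew : List (PySem.Dict String String) → List String → List String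
  | [], _ => []
  | a :: t, seen =>
      if seen.contains (pvName a) then pvNew t seen
      else pvName a :: pvNew t (seen ++ [pvName a])

theorem enumFrom_length {α : Type} (n : Int) (l : List α) : (enumFrom n l).length = l.length := by
  induction l generalizing n with
  | nil => rfl
  | cons a t ih => simp [enumFrom, ih]

theorem enumFrom_append {α : Type} (n : Int) (l : List α) (a : α) :
    enumFrom n (l ++ [a]) = enumFrom n l ++ [(n + l.length, a)] := by
  induction l generalizing n with
  | nil => simp [enumFrom]
  | cons b t ih => simp [enumFrom, ih]; omega

theorem enumFrom_map {α β : Type} (g : α → β) (n : Int) (l : List α) :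
    enumFrom n (l.map g) = (enumFrom n l).map (fun r => (r.1, g r.2)) := by
  induction l generalizing n with
  | nil => rfl
  | cons a t ih => simp [enumFrom, ih]

theorem enumFrom_fst_lt {α : Type} (n j : Int) (l : List α)
    (h : j ∈ (enumFrom n l).map (fun r => r.1)) : j < n + l.length := by
  induction l generalizing n with
  | nil => simp [enumFrom] at h
  | cons a t ih =>
    simp only [enumFrom, List.map_cons, List.mem_cons] at h
    rcases h with h | h
    · subst h; simp only [List.length_cons]; omega
    · have := ih (n + 1) h
      simp only [List.length_cons]
      omega

theorem get?_mk_map {β γ : Type} (h : β → γ) (l : List (String × β)) (k : String) :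
    (PySem.Dict.mk (l.map (fun q => (q.1, h q.2)))).get? k = ((PySem.Dict.mk l).get? k).map h := by
  induction l with
  | nil => simp [PySem.Dict.get?]
  | cons p t ih =>
    obtain ⟨k1, v1⟩ := p
    simp only [List.map_cons, PySem.Dict.get?_mk_cons]
    by_cases hk : k1 == k
    · rw [if_pos hk, if_pos hk]; rfl
    · rw [if_neg hk, if_neg hk, ih]

theorem contains_mk_map {β γ : Type} (h : β → γ) (l : List (String × β)) (k : String) :
    (PySem.Dict.mk (l.map (fun q => (q.1, h q.2)))).contains k = (PySem.Dict.mk l).contains k := by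
  rw [PySem.Dict.contains_eq_isSome_get?, PySem.Dict.contains_eq_isSome_get?, get?_mk_map]
  cases (PySem.Dict.mk l).get? k <;> rfl

theorem pvMk_contains (G : PySem.Dict String (List (PySem.Dict String String))) (k : String) :
    (pvMk G).contains k = G.contains k := by
  exact contains_mk_map (fun l => PySem.Dict.mk (enumFrom 1 l)) G.items k

theorem pvMk_get? (G : PySem.Dict String (List (PySem.Dict String String))) (k : String) :
    (pvMk G).get? k = (G.get? k).map (fun l => PySem.Dict.mk (enumFrom 1 l)) := by
  exact get?_mk_map (fun l => PySem.Dict.mk (enumFrom 1 l)) G.items k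

-- fresh inner key: 1 + |l| is larger than every key of {1: …, |l|: …}
theorem contains_enum_fresh (l : List (PySem.Dict String String)) :
    (PySem.Dict.mk (enumFrom 1 l)).contains ((l.length : Int) + 1) = false := by
  rw [PySem.Dict.contains_eq_decide_mem_keys, PySem.Dict.keys_mk]
  simp only [decide_eq_false_iff_not]
  intro hmem
  have := enumFrom_fst_lt 1 ((l.length : Int) + 1) l hmem
  omega

-- one step of A's loop on the rendered dict = the rendering of one grouping step
theorem pv_step (G : PySem.Dict String (List (PySem.Dict String String)))
    (a : PySem.Dict String String) :
    (let name := (a.get? "eniqName").getD "";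
     if (pvMk G).contains name then
       (pvMk G).insert name (((pvMk G).getD name PySem.Dict.empty).insert
         ((((pvMk G).getD name PySem.Dict.empty).keys.length : Int) + 1) a)
     else
       (pvMk G).insert name ((PySem.Dict.empty : PySem.Dict Int (PySem.Dict String String)).insert 1 a))
    = pvMk (G.insert ((a.get? "eniqName").getD "") (G.getD ((a.get? "eniqName").getD "") [] ++ [a])) := by
  set name := (a.get? "eniqName").getD "" with hname
  by_cases hc : G.contains name = true
  · -- existing group
    obtain ⟨lG, hlG⟩ : ∃ lG, G.get? name = some lG := by
      rw [PySem.Dict.contains_eq_isSome_get?] at hc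
      cases hget : G.get? name
      · rw [hget] at hc; simp at hc
      · exact ⟨_, rfl⟩
    have hgd : G.getD name [] = lG := by rw [PySem.Dict.getD_eq_get?_getD, hlG]; rfl
    have hgdp : (pvMk G).getD name PySem.Dict.empty = PySem.Dict.mk (enumFrom 1 lG) := by
      rw [PySem.Dict.getD_eq_get?_getD, pvMk_get?, hlG]; rfl
    have hkl : (((pvMk G).getD name PySem.Dict.empty).keys.length : Int) = (lG.length : Int) := by
      rw [hgdp, PySem.Dict.keys_mk, List.length_map, enumFrom_length]
    have hinner : ((pvMk G).getD name PySem.Dict.empty).insert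
        ((((pvMk G).getD name PySem.Dict.empty).keys.length : Int) + 1) a
        = PySem.Dict.mk (enumFrom 1 (lG ++ [a])) := by
      rw [hkl, hgdp]
      apply PySem.Dict.ext
      rw [PySem.Dict.items_insert_of_not_contains _ _ (contains_enum_fresh lG), enumFrom_append]
      have h1 : (1 : Int) + (lG.length : Int) = (lG.length : Int) + 1 := by omega
      rw [h1]
    simp only [pvMk_contains, hc, if_pos, hinner]
    apply PySem.Dict.ext
    rw [PySem.Dict.items_insert_of_contains _ _ (by rw [pvMk_contains]; exact hc)]
    rw [pvMk, pvMk, PySem.Dict.items,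
      PySem.Dict.items_insert_of_contains _ _ hc, hgd]
    rw [List.map_map, List.map_map]
    apply List.map_congr_left
    intro q _
    by_cases hq : q.1 == name <;> simp [Function.comp, hq]
  · -- new group
    have hc' : G.contains name = false := by cases h : G.contains name; rfl; exact absurd h hc
    have hgd : G.getD name [] = [] := PySem.Dict.getD_of_not_contains _ _ hc'
    simp only [pvMk_contains, hc', if_neg, Bool.false_eq_true, not_false_iff]
    apply PySem.Dict.ext
    rw [PySem.Dict.items_insert_of_not_contains _ _ (by rw [pvMk_contains]; exact hc')]
    rw [pvMk, pvMk, PySem.Dict.items,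
      PySem.Dict.items_insert_of_not_contains _ _ hc', hgd]
    rw [List.map_append]
    congr 1

-- A's loop stays in lock-step with the abstract grouping fold over any suffix
theorem pv_fold (L : List (Int × PySem.Dict String String))
    (G : PySem.Dict String (List (PySem.Dict String String))) :
    L.foldl (fun per p =>
      let name := (p.2.get? "eniqName").getD ""
      if per.contains name then
        per.insert name ((per.getD name PySem.Dict.empty).insert
          (((per.getD name PySem.Dict.empty).keys.length : Int) + 1) p.2)
      else
        per.insert name ((PySem.Dict.empty : PySem.Dict Int (PySem.Dict String String)).insert 1 p.2))
      (pvMk G)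
    = pvMk (L.foldl (fun g p =>
        let name := (p.2.get? "eniqName").getD ""
        g.insert name (g.getD name [] ++ [p.2])) G) := by
  induction L generalizing G with
  | nil => rfl
  | cons p t ih =>
    simp only [List.foldl_cons]
    rw [pv_step G p.2]
    exact ih _

-- names produced by pvNew are never among the already-seen ones
theorem pv_contains_mem {l : List String} {x : String} (h : l.contains x = true) : x ∈ l := by
  simpa using h

theorem pv_contains_not_mem {l : List String} {x : String} (h : l.contains x = false) : x ∉ l := by
  simpa using h

theorem pvNew_not_mem (L : List (PySem.Dict String String)) (seen : List String)
    (n : String) (h : n ∈ pvNew L seen) : n ∉ seen := by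
  induction L generalizing seen with
  | nil => simp [pvNew] at h
  | cons a t ih =>
    by_cases hc : seen.contains (pvName a) = true
    · rw [pvNew, if_pos hc] at h
      exact ih seen h
    · have hc' : seen.contains (pvName a) = false := by
        cases hh : seen.contains (pvName a); rfl; exact absurd hh hc
      rw [pvNew, if_neg (by rw [hc']; exact Bool.false_ne_true)] at h
      rcases List.mem_cons.mp h with h | h
      · exact h ▸ pv_contains_not_mem hc'
      · have := ih (seen ++ [pvName a]) h
        intro hmem
        exact this (List.mem_append_left _ hmem)

-- pvNew is the tail the Python set/dedup fold appends to seen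
theorem pvNew_eq_foldl_add (L : List (PySem.Dict String String)) (seen : List String) :
    seen ++ pvNew L seen = (L.map pvName).foldl PySem.Set.add seen := by
  induction L generalizing seen with
  | nil => simp [pvNew]
  | cons a t ih =>
    by_cases hc : seen.contains (pvName a) = true
    · have hm : pvName a ∈ seen := pv_contains_mem hc
      rw [List.map_cons, List.foldl_cons,
        show PySem.Set.add seen (pvName a) = seen by simp [PySem.Set.add, hm]]
      rw [← ih seen, pvNew, if_pos hc]
    · have hc' : seen.contains (pvName a) = false := by
        cases hh : seen.contains (pvName a); rfl; exact absurd hh hc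
      have hm : pvName a ∉ seen := pv_contains_not_mem hc'
      rw [List.map_cons, List.foldl_cons,
        show PySem.Set.add seen (pvName a) = seen ++ [pvName a] by simp [PySem.Set.add, hm]]
      rw [← ih (seen ++ [pvName a]), pvNew, if_neg (by rw [hc']; exact Bool.false_ne_true)]
      simp

-- the grouping fold characterised: existing groups get their filtered suffix appended,
-- and each fresh name (first-occurrence order) maps to its whole filtered sublist
theorem pvGroup_items (L : List (PySem.Dict String String))
    (G : PySem.Dict String (List (PySem.Dict String String))) (hnd : G.keys.Nodup) :
    (L.foldl (fun g a => g.insert (pvName a) (g.getD (pvName a) [] ++ [a])) G).items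
    = G.items.map (fun q => (q.1, q.2 ++ L.filter (fun a => pvName a == q.1)))
      ++ (pvNew L G.keys).map (fun n => (n, L.filter (fun a => pvName a == n))) := by
  induction L generalizing G with
  | nil =>
    simp [pvNew]
  | cons a t ih =>
    simp only [List.foldl_cons]
    by_cases hc : G.contains (pvName a) = true
    · -- existing key: items updated in place, keys unchanged
      have hknd : (G.insert (pvName a) (G.getD (pvName a) [] ++ [a])).keys.Nodup := by
        rw [PySem.Dict.keys_insert_of_contains _ _ hc]; exact hnd
      rw [ih _ hknd]
      have hkeys : (G.insert (pvName a) (G.getD (pvName a) [] ++ [a])).keys = G.keys :=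
        PySem.Dict.keys_insert_of_contains _ _ hc
      have hmemk : pvName a ∈ G.keys := by
        rw [PySem.Dict.contains_eq_decide_mem_keys] at hc
        exact of_decide_eq_true hc
      have hkc : G.keys.contains (pvName a) = true := by
        rw [List.contains_iff_mem]; simpa using hmemk
      rw [hkeys, PySem.Dict.items_insert_of_contains _ _ hc, List.map_map]
      rw [show pvNew (a :: t) G.keys = pvNew t G.keys by rw [pvNew, if_pos hkc]]
      congr 1
      · apply List.map_congr_left
        intro q hq
        simp only [Function.comp]
        by_cases hq1 : q.1 == pvName a
        · have hq1' : q.1 = pvName a := by simpa using hq1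
          have hgd : G.getD q.1 [] = q.2 := by
            obtain ⟨k, v⟩ := q
            exact PySem.Dict.getD_of_mem_items G hq hnd []
          rw [if_pos hq1]
          simp only [List.filter_cons]
          rw [if_pos (by simpa using hq1'.symm)]
          rw [← hq1', hgd]
          simp
        · rw [if_neg hq1]
          simp only [List.filter_cons]
          rw [if_neg (by
            simp only [beq_iff_eq] at hq1 ⊢
            exact fun h => hq1 h.symm)]
      · apply List.map_congr_left
        intro n hn
        have hnot := pvNew_not_mem t G.keys n hn
        have hne : pvName a ≠ n := fun h => hnot (h ▸ hmemk)
        simp only [List.filter_cons]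
        rw [if_neg (by simpa using hne)]
    · -- fresh key: appended at the end, name recorded as seen
      have hc' : G.contains (pvName a) = false := by
        cases hh : G.contains (pvName a); rfl; exact absurd hh hc
      have hgd : G.getD (pvName a) [] = [] := PySem.Dict.getD_of_not_contains _ _ hc'
      have hnotk : pvName a ∉ G.keys := by
        rw [PySem.Dict.contains_eq_decide_mem_keys] at hc'
        simpa using hc'
      have hknd : (G.insert (pvName a) (G.getD (pvName a) [] ++ [a])).keys.Nodup := by
        rw [PySem.Dict.keys_insert_of_not_contains _ _ hc']
        rw [List.nodup_append]
        exact ⟨hnd, List.nodup_singleton _, by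
          intro x hx b hb h
          exact hnotk ((List.mem_singleton.mp hb) ▸ h ▸ hx)⟩
      rw [ih _ hknd]
      have hkeys : (G.insert (pvName a) (G.getD (pvName a) [] ++ [a])).keys
          = G.keys ++ [pvName a] := PySem.Dict.keys_insert_of_not_contains _ _ hc'
      have hkc : G.keys.contains (pvName a) = false := by
        rw [Bool.eq_false_iff]
        intro hh
        rw [List.contains_iff_mem] at hh
        exact hnotk (by simpa using hh)
      rw [hkeys, PySem.Dict.items_insert_of_not_contains _ _ hc', hgd, List.map_append]
      rw [show pvNew (a :: t) G.keys = pvName a :: pvNew t (G.keys ++ [pvName a]) by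
        rw [pvNew, if_neg (by rw [hkc]; exact Bool.false_ne_true)]]
      rw [List.map_cons, List.append_assoc]
      congr 1
      · apply List.map_congr_left
        intro q hq
        have hq1 : q.1 ∈ G.keys := PySem.Dict.mem_keys_of_mem_items G hq
        have hne : pvName a ≠ q.1 := fun h => hnotk (by rw [h]; exact hq1)
        simp only [List.filter_cons]
        rw [if_neg (by simpa using hne)]
      · simp only [List.map_cons]
        refine List.cons_eq_cons.mpr ⟨?_, ?_⟩
        · simp only [List.filter_cons]
          rw [if_pos (by simp)]
          simp
        · apply List.map_congr_left
          intro n hn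
          have hnot := pvNew_not_mem t (G.keys ++ [pvName a]) n hn
          have hne : pvName a ≠ n := fun h => hnot (h ▸ List.mem_append_right _ (by simp))
          simp only [List.filter_cons]
          rw [if_neg (by simpa using hne)]

-- ===== VERDICT (by name: the statement is the Claim_ definition above) =====
theorem create_dict_per_eniq_spec : Claim_equal_create_dict_per_eniq := by
  intro dict_data _ _
  unfold Spec_create_dict_per_eniq create_dict_per_eniq create_dict_per_eniq_alt
  simp only
  set dd := PySem.Dict.ofList (dict_data.map (fun p => (p.1, PySem.Dict.ofList p.2))) with hdd
  -- A's loop as the rendered grouping fold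
  have hempty : (PySem.Dict.empty : PySem.Dict String (PySem.Dict Int (PySem.Dict String String)))
      = pvMk PySem.Dict.empty := rfl
  rw [hempty, pv_fold]
  -- the grouping fold over items = the grouping fold over values
  have hvals : dd.items.foldl (fun g p =>
        let name := (p.2.get? "eniqName").getD ""
        g.insert name (g.getD name [] ++ [p.2])) PySem.Dict.empty
      = dd.values.foldl (fun g a => g.insert (pvName a) (g.getD (pvName a) [] ++ [a]))
          PySem.Dict.empty := by
    rw [show dd.values = dd.items.map (fun r => r.2) from rfl, List.foldl_map]
    rfl
  rw [hvals, pvMk, PySem.Dict.items,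
    pvGroup_items dd.values PySem.Dict.empty (by simp [PySem.Dict.keys_empty])]
  simp only [show (PySem.Dict.empty :
      PySem.Dict String (List (PySem.Dict String String))).items = [] from rfl,
    show (PySem.Dict.empty :
      PySem.Dict String (List (PySem.Dict String String))).keys = [] from rfl,
    List.map_nil, List.nil_append]
  -- B's name list is pvNew over the values from no seen names
  have hnames : PySem.List.dedup (dd.values.map (fun a => (a.get? "eniqName").getD ""))
      = pvNew dd.values [] := by
    rw [PySem.List.dedup_eq_ofList, PySem.Set.ofList_eq_foldl,
      show (dd.values.map fun a => (a.get? "eniqName").getD "") = dd.values.map pvName from rfl,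
      ← pvNew_eq_foldl_add dd.values []]
    simp
  rw [hnames, List.map_map, List.map_map]
  apply List.map_congr_left
  intro n _
  simp only [Function.comp]
  rw [enumFrom_map]
  rfl
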